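-- pv_equiv track=rewrite | github.com/Carol773/GeeksForGeeks | Difficulty: Easy/Remove b and ac from a given string/remove-b-and-ac-from-a-given-string.py | stringFilter
-- ===== SOURCE A (Python) =====
-- def stringFilter(str):
--     # code here
--     new_s=[]
--     res=''
--     i=0
--     while i<len(str):
--         if str[i]=='b':
--             i+=1
--         elif str[i]=='a' and (i+1)<len(str) and str[i+1]=='c':
--             i+=2
--         else:
--             new_s.append(str[i])
--             i+=1
--
--     res=''.join(x for x in new_s)
--     return res
-- ===== SOURCE B (Python) =====
-- def stringFilter(str):
--     return str.replace('ac', '').replace('b', '')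
-- ===== Notes on version B (the rewrite author's own statement) =====
-- stated objective: idiomatic
-- what changed: Replaces the manual index-based while-loop with lookahead by two built-in str.replace passes (first remove non-overlapping 'ac', then remove 'b'), which coincide with the original single scan because 'b' contains no 'a'/'c' and 'b'-removal happens after the 'ac' matching.
import Mathlib
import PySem

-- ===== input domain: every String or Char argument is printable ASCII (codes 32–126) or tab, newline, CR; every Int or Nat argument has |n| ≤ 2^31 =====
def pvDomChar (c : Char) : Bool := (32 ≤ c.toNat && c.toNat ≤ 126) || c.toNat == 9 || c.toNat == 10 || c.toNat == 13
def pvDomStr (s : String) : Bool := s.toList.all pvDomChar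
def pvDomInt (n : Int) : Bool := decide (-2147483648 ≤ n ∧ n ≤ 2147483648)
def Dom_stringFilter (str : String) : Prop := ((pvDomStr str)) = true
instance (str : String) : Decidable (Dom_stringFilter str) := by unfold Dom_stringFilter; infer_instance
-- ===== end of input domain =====

-- B replaces A's manual index-based while-loop (skip 'b'; skip 'a' when followed by 'c') by two
-- built-in replace passes: str.replace('ac','').replace('b','') — idiomatic, same O(n) cost.

-- ===== PORT A =====
-- A's while-loop over index i, carrying the accumulator new_s (appended, joined at the end);
-- advancing i by 1/2 becomes structural recursion dropping 1/2 chars of the remaining list.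
def stringFilterGo (l : List Char) (acc : List Char) : List Char :=
  match l with
  | [] => acc.reverse
  | c :: t =>
    if c == 'b' then stringFilterGo t acc
    else if c == 'a' && t.head? == some 'c' then stringFilterGo t.tail acc
    else stringFilterGo t (c :: acc)
termination_by l.length
decreasing_by
  · simp
  · cases t <;> simp
  · simp

def stringFilter (str : String) : String :=
  String.ofList (stringFilterGo str.toList [])

-- ===== PORT B =====
def stringFilter_alt (str : String) : String :=
  PySem.Str.replace (PySem.Str.replace str "ac" "") "b" ""

-- ===== PRECONDITION & SPEC =====
def Spec_stringFilter (str : String) (out : String) : Prop := out = stringFilter_alt str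
instance (str : String) (out : String) : Decidable (Spec_stringFilter str out) := by unfold Spec_stringFilter; infer_instance

-- ===== CLAIM (what is proved, stated in full; the proofs are below) =====
def Claim_equal_stringFilter : Prop := ∀ (str : String), Dom_stringFilter str → Spec_stringFilter str (stringFilter str)

-- ===== LEMMAS AND PROOFS =====

-- the non-overlapping left-to-right 'ac' removal, as a plain recursion
def remAC : List Char → List Char
  | [] => []
  | 'a' :: 'c' :: t => remAC t
  | c :: t => c :: remAC t

theorem go_b (fuel : Nat) (l acc : List Char) (h : l.length ≤ fuel) :
    PySem.Chars.replace.go ['b'] [] fuel l acc = acc.reverse ++ l.filter (· ≠ 'b') := by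
  induction fuel generalizing l acc with
  | zero =>
    have : l = [] := by cases l <;> simp_all
    subst this; simp [PySem.Chars.replace.go]
  | succ n ih =>
    cases l with
    | nil => simp [PySem.Chars.replace.go]
    | cons c t =>
      simp only [PySem.Chars.replace.go]
      by_cases hc : c = 'b'
      · subst hc
        rw [if_pos (by simp [List.isPrefixOf])]
        rw [show List.drop (['b'].length) ('b' :: t) = t from rfl]
        simp only [List.reverse_nil, List.nil_append]
        rw [ih t acc (by simp at h; omega)]
        simp
      · rw [if_neg (by simp [List.isPrefixOf]; exact fun hh => hc hh.symm)]
        rw [ih t (c :: acc) (by simp at h; omega)]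
        simp [hc]

theorem replace_b (l : List Char) :
    PySem.Chars.replace l ['b'] [] = l.filter (· ≠ 'b') := by
  rw [PySem.Chars.replace]
  simp only [List.isEmpty_cons, Bool.false_eq_true, if_false]
  exact go_b l.length l [] le_rfl

theorem go_ac (fuel : Nat) (l acc : List Char) (h : l.length ≤ fuel) :
    PySem.Chars.replace.go ['a', 'c'] [] fuel l acc = acc.reverse ++ remAC l := by
  induction fuel generalizing l acc with
  | zero =>
    have : l = [] := by cases l <;> simp_all
    subst this; simp [PySem.Chars.replace.go, remAC]
  | succ n ih =>
    cases l with
    | nil => simp [PySem.Chars.replace.go, remAC]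
    | cons c t =>
      simp only [PySem.Chars.replace.go]
      by_cases hp : ['a', 'c'].isPrefixOf (c :: t) = true
      · rw [if_pos hp]
        obtain ⟨c2, t2, hc, hc2, ht⟩ : ∃ c2 t2, c = 'a' ∧ c2 = 'c' ∧ t = c2 :: t2 := by
          cases t with
          | nil => simp [List.isPrefixOf] at hp
          | cons c2 t2 =>
            simp only [List.isPrefixOf, Bool.and_eq_true, beq_iff_eq] at hp
            exact ⟨c2, t2, hp.1.symm, hp.2.1.symm, rfl⟩
        subst hc hc2 ht
        rw [show List.drop (['a','c'].length) ('a' :: 'c' :: t2) = t2 from rfl]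
        simp only [List.reverse_nil, List.nil_append]
        rw [ih t2 acc (by simp at h; omega)]
        simp [remAC]
      · rw [if_neg hp]
        rw [ih t (c :: acc) (by simp at h; omega)]
        have : remAC (c :: t) = c :: remAC t := by
          simp only [List.isPrefixOf] at hp
          cases t with
          | nil => cases c; simp_all [remAC, Char.ext_iff]
          | cons c2 t2 =>
            simp only [List.isPrefixOf, Bool.and_eq_true, beq_iff_eq, not_and] at hp
            by_cases hca : c = 'a'
            · subst hca
              have hc2 : c2 ≠ 'c' := by intro hh; subst hh; simp at hp
              cases c2; simp_all [remAC, Char.ext_iff]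
            · cases c; simp_all [remAC, Char.ext_iff]
        rw [this]; simp

theorem replace_ac (l : List Char) :
    PySem.Chars.replace l ['a', 'c'] [] = remAC l := by
  rw [PySem.Chars.replace]
  simp only [List.isEmpty_cons, Bool.false_eq_true, if_false]
  exact go_ac l.length l [] le_rfl

-- A's loop computes: drop the original 'ac' pairs, then filter out all 'b'
theorem stringFilterGo_eq (l acc : List Char) :
    stringFilterGo l acc = acc.reverse ++ (remAC l).filter (· ≠ 'b') := by
  induction l, acc using stringFilterGo.induct with
  | case1 acc => simp [stringFilterGo, remAC]
  | case2 acc c t hb ih =>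
    have hcb : c = 'b' := by simpa using hb
    subst hcb
    rw [stringFilterGo]
    simp only [beq_self_eq_true, if_true, ih]
    have : remAC ('b' :: t) = 'b' :: remAC t := by
      cases t <;> rfl
    simp [this]
  | case3 acc c t hb hac ih =>
    obtain ⟨hca, hhd⟩ : c = 'a' ∧ t.head? = some 'c' := by
      simp only [Bool.and_eq_true, beq_iff_eq] at hac
      exact hac
    subst hca
    obtain ⟨t2, ht⟩ : ∃ t2, t = 'c' :: t2 := by
      cases t with
      | nil => simp at hhd
      | cons x xs => simp at hhd; exact ⟨xs, by rw [hhd]⟩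
    subst ht
    rw [stringFilterGo]
    simp only [hb, Bool.false_eq_true, if_false, hac, if_true, List.tail_cons] at *
    rw [ih]
    simp [remAC]
  | case4 acc c t hb hac ih =>
    rw [stringFilterGo]
    simp only [hb, Bool.false_eq_true, if_false, hac, if_false]
    rw [ih]
    have hcb : c ≠ 'b' := by simpa using hb
    have hr : remAC (c :: t) = c :: remAC t := by
      by_cases hca : c = 'a'
      · subst hca
        cases t with
        | nil => simp [remAC]
        | cons x xs =>
          have hx : x ≠ 'c' := by
            intro hh; subst hh; simp at hac
          cases x; simp_all [remAC, Char.ext_iff]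
      · cases c; simp_all [remAC, Char.ext_iff]
    simp [hr, hcb]

-- ===== VERDICT (by name: the statement is the Claim_ definition above) =====
theorem stringFilter_spec : Claim_equal_stringFilter := by
  intro str _
  show stringFilter str = stringFilter_alt str
  have h1 : (PySem.Str.replace str "ac" "").toList = remAC str.toList := by
    rw [PySem.Str.toList_replace]
    exact replace_ac str.toList
  apply String.toList_injective
  show _ = (PySem.Str.replace (PySem.Str.replace str "ac" "") "b" "").toList
  rw [PySem.Str.toList_replace, h1]
  rw [show ("b" : String).toList = ['b'] from rfl, show ("" : String).toList = ([] : List Char) from rfl]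
  rw [replace_b]
  show (String.ofList (stringFilterGo str.toList [])).toList = _
  rw [String.toList_ofList, stringFilterGo_eq]
  simp
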